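-- pv_equiv track=rewrite | github.com/buaabuaazk/contributing_file_classify | src/gentitle.py | is_valid_markdown_title
-- ===== SOURCE A (Python) =====
-- def is_valid_markdown_title(line):
--     """
--     判断一行是否是有效的 Markdown 标题
--     标题要求：
--     1. 行首是 # (可以有0-3个空格缩进)
--     2. # 后面必须有至少一个空格
--     3. 排除代码块中的内容
--     """
--     stripped = line.lstrip()
--     # 检查是否以 # 开头且后面跟空格
--     if stripped.startswith('#'):
--         # 找到第一个非 # 字符
--         hash_count = 0
--         for char in stripped:
--             if char == '#':
--                 hash_count += 1
--             else:
--                 break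
--
--         # 有效的标题：1-6个#，且后面跟空格
--         if 1 <= hash_count <= 6:
--             after_hashes = stripped[hash_count:]
--             # 后面必须是空格开头（或者只有#没有内容）
--             if len(after_hashes) == 0 or after_hashes[0] == ' ':
--                 return True
--
--     return False
-- ===== SOURCE B (Python) =====
-- def is_valid_markdown_title(line):
--     s = line.lstrip()
--     return any(s == '#' * k or s.startswith('#' * k + ' ') for k in range(1, 7))
-- ===== Notes on version B (the rewrite author's own statement) =====
-- stated objective: simpler
-- what changed: Replaced A's char-by-char hash-counting loop plus count-range and indexing checks with a single any() over k from 1 to 6 testing whether the stripped line is exactly k hashes or k hashes followed by a space.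
import Mathlib
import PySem

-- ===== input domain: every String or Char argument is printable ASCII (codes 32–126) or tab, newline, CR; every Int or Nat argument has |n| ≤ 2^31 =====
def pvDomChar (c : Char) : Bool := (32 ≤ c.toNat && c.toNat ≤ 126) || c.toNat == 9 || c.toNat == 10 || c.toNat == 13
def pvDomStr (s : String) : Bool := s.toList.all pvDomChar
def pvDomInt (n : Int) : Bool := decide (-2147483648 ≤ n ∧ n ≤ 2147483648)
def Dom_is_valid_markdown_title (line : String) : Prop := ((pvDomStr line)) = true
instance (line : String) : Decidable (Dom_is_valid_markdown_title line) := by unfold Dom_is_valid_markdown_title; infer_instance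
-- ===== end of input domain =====

-- B replaces A's manual hash-counting loop with a direct pattern check: for some k from 1 to 6,
-- the stripped line is exactly k hashes, or k hashes followed by a space (objective: simpler).

-- ===== PORT A =====
-- A's `for char in stripped: if char == '#': hash_count += 1 else break` loop
def pvHashCount : List Char → Int → Int
  | [], acc => acc
  | c :: rest, acc => if c = '#' then pvHashCount rest (acc + 1) else acc

-- A's body applied to the already-lstripped line
def pvCheckA (stripped : String) : Bool :=
  if PySem.Str.startswith stripped "#" then
    let hash_count := pvHashCount stripped.toList 0
    if 1 ≤ hash_count ∧ hash_count ≤ 6 then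
      let after_hashes := PySem.Str.slice stripped (some hash_count) none
      if PySem.Str.len after_hashes = 0 ∨ PySem.Str.pyGet? after_hashes 0 = some ' ' then
        true
      else false
    else false
  else false

def is_valid_markdown_title (line : String) : Bool :=
  pvCheckA (PySem.Str.lstrip line)

-- ===== PORT B =====
-- B's body applied to the already-lstripped line: any(s == '#'*k or s.startswith('#'*k + ' ') for k in range(1, 7))
def pvCheckB (s : String) : Bool :=
  (PySem.List.pyRange 1 7).any (fun k =>
    (s == String.ofList (List.replicate k.toNat '#')) ||
    PySem.Str.startswith s (String.ofList (List.replicate k.toNat '#' ++ [' '])))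

def is_valid_markdown_title_alt (line : String) : Bool :=
  pvCheckB (PySem.Str.lstrip line)

-- ===== PRECONDITION & SPEC =====
def Spec_is_valid_markdown_title (line : String) (out : Bool) : Prop := out = is_valid_markdown_title_alt line
instance (line : String) (out : Bool) : Decidable (Spec_is_valid_markdown_title line out) := by unfold Spec_is_valid_markdown_title; infer_instance

-- ===== CLAIM (what is proved, stated in full; the proofs are below) =====
def Claim_equal_is_valid_markdown_title : Prop := ∀ (line : String), Dom_is_valid_markdown_title line → Spec_is_valid_markdown_title line (is_valid_markdown_title line)

-- ===== LEMMAS AND PROOFS =====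

-- A's loop counts the leading '#' characters
lemma pvHashCount_eq (cs : List Char) : ∀ acc : Int,
    pvHashCount cs acc = acc + ((cs.takeWhile (fun c => c == '#')).length : Int) := by
  induction cs with
  | nil => intro acc; simp [pvHashCount]
  | cons c rest ih =>
    intro acc
    by_cases h : c = '#'
    · simp [pvHashCount, List.takeWhile, h, ih]; omega
    · have hb : (c == '#') = false := by simp [h]
      simp [pvHashCount, List.takeWhile, hb, h]

-- the take/drop decomposition of a string beginning with m hashes followed by a non-hash
lemma pvTakeDrop (m : Nat) (rest : List Char) (h : ∀ a, rest.head? = some a → a ≠ '#') :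
    (List.replicate m '#' ++ rest).takeWhile (fun c => c == '#') = List.replicate m '#' ∧
    (List.replicate m '#' ++ rest).dropWhile (fun c => c == '#') = rest := by
  induction m with
  | zero =>
    cases rest with
    | nil => simp
    | cons a t => have := h a rfl; simp [this]
  | succ n ih =>
    simp only [List.replicate_succ, List.cons_append, List.takeWhile, List.dropWhile]
    simpa using ih

lemma pvHeadDrop (cs : List Char) :
    ∀ a, ((cs.dropWhile (fun c => c == '#')).head? = some a) → a ≠ '#' := by
  induction cs with
  | nil => simp
  | cons c rest ih =>
    intro a ha
    by_cases h : c = '#'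
    · exact ih a (by simpa [List.dropWhile, h] using ha)
    · have hb : (c == '#') = false := by simp [h]
      simp [List.dropWhile, hb] at ha
      subst ha; exact h

-- the common characterisation: stripped line = '#'*t ++ rest with 1 ≤ t ≤ 6 and rest empty or starting with a space
def pvP (s : String) : Prop :=
  1 ≤ (s.toList.takeWhile (fun c => c == '#')).length ∧
  (s.toList.takeWhile (fun c => c == '#')).length ≤ 6 ∧
  (s.toList.dropWhile (fun c => c == '#') = [] ∨
   (s.toList.dropWhile (fun c => c == '#')).head? = some ' ')

-- the stripped line splits as '#'*t ++ (its part after the hashes)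
lemma pvSplit (cs : List Char) :
    List.replicate (cs.takeWhile (fun c => c == '#')).length '#' ++
      cs.dropWhile (fun c => c == '#') = cs := by
  have htw : cs.takeWhile (fun c => c == '#')
      = List.replicate (cs.takeWhile (fun c => c == '#')).length '#' := by
    rw [List.eq_replicate_iff]
    exact ⟨rfl, fun b hb => by simpa using List.mem_takeWhile_imp hb⟩
  rw [← htw]; exact List.takeWhile_append_dropWhile

lemma pvA_iff (s : String) : pvCheckA s = true ↔ pvP s := by
  obtain ⟨t, ht⟩ : ∃ n, (s.toList.takeWhile (fun c => c == '#')).length = n := ⟨_, rfl⟩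
  obtain ⟨r, hr⟩ : ∃ l, s.toList.dropWhile (fun c => c == '#') = l := ⟨_, rfl⟩
  have hcs : List.replicate t '#' ++ r = s.toList := by rw [← ht, ← hr]; exact pvSplit s.toList
  have hhc : pvHashCount s.toList 0 = (t : Int) := by simp [ht, pvHashCount_eq s.toList 0]
  have hheadr : ∀ a, r.head? = some a → a ≠ '#' := fun a ha => pvHeadDrop s.toList a (hr ▸ ha)
  have hdrop : s.toList.drop t = r := by
    conv_lhs => rw [← hcs]
    simp [List.drop_left (l₁ := List.replicate t '#') (l₂ := r)]
  have hafter : (PySem.Str.slice s (some (pvHashCount s.toList 0)) none).toList = r := by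
    rw [hhc, PySem.Str.toList_slice]
    show PySem.List.slice s.toList (some (t : Int)) none = _
    rw [PySem.List.slice_from_natCast, hdrop]
  have hstart : (PySem.Str.startswith s "#" = true) ↔ 1 ≤ t := by
    rw [PySem.Str.startswith_eq, show ("#" : String).toList = ['#'] from rfl,
      PySem.Chars.startswith_iff]
    constructor
    · rintro ⟨u, hu⟩
      by_contra hlt
      have ht0 : t = 0 := by omega
      have hdw : r = s.toList := by simpa [ht0] using hcs
      exact hheadr '#' (by rw [hdw, ← hu]; rfl) rfl
    · intro h1t
      obtain ⟨u, hu⟩ : ∃ u, t = u + 1 := ⟨t - 1, by omega⟩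
      refine ⟨List.replicate u '#' ++ r, ?_⟩
      rw [← hcs, hu]; simp [List.replicate_succ]
  have hlen : (PySem.Str.len (PySem.Str.slice s (some (pvHashCount s.toList 0)) none) = 0)
      ↔ r = [] := by
    rw [PySem.Str.len_eq, hafter]
    constructor
    · intro h; exact List.length_eq_zero_iff.mp (by exact_mod_cast h)
    · intro h; simp [h]
  have hget : (PySem.Str.pyGet? (PySem.Str.slice s (some (pvHashCount s.toList 0)) none) 0
      = some ' ') ↔ r.head? = some ' ' := by
    rw [PySem.Str.pyGet?_eq]
    show PySem.List.pyGet? (PySem.Str.slice s (some (pvHashCount s.toList 0)) none).toList 0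
      = some ' ' ↔ _
    rw [hafter, PySem.List.pyGet?_zero]
    cases r <;> simp
  simp only [pvCheckA, pvP, ht, hr]
  split_ifs with h1 h2 h3
  · simp only [true_iff]
    rw [hhc] at h2
    rw [hlen, hget] at h3
    exact ⟨by omega, by omega, h3⟩
  · simp only [false_iff]
    rintro ⟨-, -, hp3⟩
    exact h3 (by rw [hlen, hget]; exact hp3)
  · simp only [false_iff]
    rintro ⟨hp1, hp2, -⟩
    refine h2 (by rw [hhc]; exact ⟨by exact_mod_cast hp1, by exact_mod_cast hp2⟩)
  · simp only [false_iff]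
    rintro ⟨hp1, -, -⟩
    exact h1 (hstart.mpr hp1)

lemma pvB_iff (s : String) : pvCheckB s = true ↔ pvP s := by
  obtain ⟨t, ht⟩ : ∃ n, (s.toList.takeWhile (fun c => c == '#')).length = n := ⟨_, rfl⟩
  obtain ⟨r, hr⟩ : ∃ l, s.toList.dropWhile (fun c => c == '#') = l := ⟨_, rfl⟩
  have hcs : List.replicate t '#' ++ r = s.toList := by rw [← ht, ← hr]; exact pvSplit s.toList
  simp only [pvCheckB, pvP, ht, hr]
  rw [show PySem.List.pyRange 1 7 = [1, 2, 3, 4, 5, 6] from rfl, List.any_eq_true]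
  constructor
  · rintro ⟨k, hk, hf⟩
    simp only [List.mem_cons, List.not_mem_nil, or_false] at hk
    have hmb : 1 ≤ k.toNat ∧ k.toNat ≤ 6 := by
      rcases hk with rfl | rfl | rfl | rfl | rfl | rfl <;> simp
    rcases Bool.or_eq_true_iff.mp hf with hc | hc
    · have hceq : s.toList = List.replicate k.toNat '#' ++ [] := by
        rw [show s = String.ofList (List.replicate k.toNat '#') from beq_iff_eq.mp hc,
          String.toList_ofList]; simp
      obtain ⟨htw, hdw⟩ := pvTakeDrop k.toNat [] (by simp)
      have ht' : t = k.toNat := by rw [← ht, hceq, htw]; simp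
      have hr' : r = [] := by rw [← hr, hceq, hdw]
      exact ⟨by omega, by omega, Or.inl hr'⟩
    · rw [PySem.Str.startswith_eq, String.toList_ofList] at hc
      obtain ⟨u, hu⟩ := (PySem.Chars.startswith_iff _ _).mp hc
      have hceq : s.toList = List.replicate k.toNat '#' ++ (' ' :: u) := by
        rw [← hu]; simp
      obtain ⟨htw, hdw⟩ := pvTakeDrop k.toNat (' ' :: u)
        (by intro a ha; simp at ha; subst ha; decide)
      have ht' : t = k.toNat := by rw [← ht, hceq, htw]; simp
      have hr' : r = ' ' :: u := by rw [← hr, hceq, hdw]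
      exact ⟨by omega, by omega, Or.inr (by rw [hr']; rfl)⟩
  · rintro ⟨h1, h2, h3⟩
    refine ⟨(t : Int), by simp only [List.mem_cons, List.not_mem_nil, or_false]; omega, ?_⟩
    rw [Int.toNat_natCast]
    rcases h3 with h3 | h3
    · apply Bool.or_eq_true_iff.mpr; left
      rw [beq_iff_eq, ← String.ofList_toList (s := s)]
      congr 1
      rw [← hcs, h3]; simp
    · apply Bool.or_eq_true_iff.mpr; right
      obtain ⟨u, hu⟩ : ∃ u, r = ' ' :: u := by
        cases r with
        | nil => simp at h3
        | cons a u => exact ⟨u, by simp_all⟩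
      rw [PySem.Str.startswith_eq, String.toList_ofList]
      apply (PySem.Chars.startswith_iff _ _).mpr
      exact ⟨u, by rw [← hcs, hu]; simp⟩

-- ===== VERDICT (by name: the statement is the Claim_ definition above) =====
theorem is_valid_markdown_title_spec : Claim_equal_is_valid_markdown_title := by
  intro line _
  unfold Spec_is_valid_markdown_title is_valid_markdown_title is_valid_markdown_title_alt
  rw [Bool.eq_iff_iff, pvA_iff, pvB_iff]
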